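-- pv_equiv track=rewrite | github.com/bhj8286/algo | programmers/공던지기/sol.py | solution
-- ===== SOURCE A (Python) =====
-- def solution(numbers, k):
--     answer = 0
--     thrower = 0
--     num_list = []
--     for i in range(k):
--         num_list.extend(numbers)
--     for j in range(0,k*2,2):
--         thrower = num_list[j]
--
--     return thrower
-- ===== SOURCE B (Python) =====
-- def solution(numbers, k):
--     if k <= 0:
--         return 0
--     return numbers[(2 * (k - 1)) % len(numbers)]
-- ===== Notes on version B (the rewrite author's own statement) =====
-- stated objective: faster
-- what changed: Replaces building the k-fold concatenation of numbers and scanning every even index with a single O(1) modular index numbers[(2*(k-1)) % len(numbers)] (0 for k <= 0).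
import Mathlib
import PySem

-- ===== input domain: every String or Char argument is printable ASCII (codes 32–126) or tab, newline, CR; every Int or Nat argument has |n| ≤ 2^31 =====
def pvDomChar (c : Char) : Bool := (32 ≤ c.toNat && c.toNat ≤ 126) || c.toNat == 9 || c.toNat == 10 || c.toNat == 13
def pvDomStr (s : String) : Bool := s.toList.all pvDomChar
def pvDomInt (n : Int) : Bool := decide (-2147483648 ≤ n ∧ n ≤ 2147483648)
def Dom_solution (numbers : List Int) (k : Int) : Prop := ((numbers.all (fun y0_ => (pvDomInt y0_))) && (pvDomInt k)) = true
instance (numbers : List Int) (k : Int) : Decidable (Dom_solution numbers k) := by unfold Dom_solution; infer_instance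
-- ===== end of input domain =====

-- B replaces A's O(k·n) build-and-scan of the k-fold concatenation with one O(1) modular index.

-- ===== PORT A =====
-- literal port of A: build num_list by extending k times, then sweep j over range(0, k*2, 2),
-- overwriting thrower with num_list[j]; an out-of-range j (IndexError in Python) is excluded
-- by Pre_solution, so the getD default is never taken on admitted inputs.
-- Python's list is ported as a Lean Array (in-place push / O(1) index, like CPython's list);
-- pyGetArr? is exact Python indexing on Arrays: nonneg in-range index, else PySem.List.pyGet?
-- (negative index from the end, none = IndexError).
def pyGetArr? (a : Array Int) (i : Int) : Option Int :=
  if 0 ≤ i then a[i.toNat]? else PySem.List.pyGet? a.toList i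

def solution (numbers : List Int) (k : Int) : Int :=
  let num_list : Array Int :=
    (PySem.List.pyRange 0 k 1).foldl
      (fun acc _ => numbers.foldl (fun a x => a.push x) acc) #[]
  (PySem.List.pyRange 0 (k * 2) 2).foldl
    (fun thrower j => (pyGetArr? num_list j).getD thrower) 0

-- ===== PORT B =====
-- literal port of Source B: early return 0 for k <= 0, else one modular index into numbers.
def solution_alt (numbers : List Int) (k : Int) : Int :=
  if k ≤ 0 then 0
  else (PySem.List.pyGet? numbers (PySem.Int.mod (2 * (k - 1)) numbers.length)).getD 0

-- ===== PRECONDITION & SPEC =====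
-- Pre_ excludes exactly the inputs where A raises IndexError: k ≥ 1 with numbers empty,
-- or k ≥ 1 with the last scanned index 2*(k-1) beyond the k*len(numbers)-long concatenation.
def Pre_solution (numbers : List Int) (k : Int) : Prop :=
  k ≤ 0 ∨ (0 < numbers.length ∧ 2 * (k - 1) < k * numbers.length)
instance (numbers : List Int) (k : Int) : Decidable (Pre_solution numbers k) := by
  unfold Pre_solution; infer_instance
def pvWitness_solution : List Int × Int := ([3, 5, 7], 2)

def Spec_solution (numbers : List Int) (k : Int) (out : Int) : Prop := out = solution_alt numbers k
instance (numbers : List Int) (k : Int) (out : Int) : Decidable (Spec_solution numbers k out) := by unfold Spec_solution; infer_instance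

-- ===== CLAIM (what is proved, stated in full; the proofs are below) =====
def Claim_equal_solution : Prop := ∀ (numbers : List Int) (k : Int), Dom_solution numbers k → Pre_solution numbers k → Spec_solution numbers k (solution numbers k)

-- ===== LEMMAS AND PROOFS =====

-- one extend step pushes the elements of numbers onto acc
theorem toList_push_fold (numbers : List Int) (acc : Array Int) :
    (numbers.foldl (fun a x => a.push x) acc).toList = acc.toList ++ numbers := by
  induction numbers generalizing acc with
  | nil => simp
  | cons x xs ih => rw [List.foldl_cons, ih, Array.toList_push, List.append_assoc, List.singleton_append]

-- the extend loop builds acc ++ (l.length copies of numbers), independent of the elements of l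
theorem foldl_extend (numbers : List Int) (acc : Array Int) (l : List Int) :
    (l.foldl (fun acc _ => numbers.foldl (fun a x => a.push x) acc) acc).toList =
      acc.toList ++ (List.replicate l.length numbers).flatten := by
  induction l generalizing acc with
  | nil => simp
  | cons x xs ih =>
    rw [List.foldl_cons, ih, toList_push_fold, List.length_cons, List.replicate_succ,
        List.flatten_cons, List.append_assoc]

-- indexing the m-fold concatenation is indexing numbers modulo its length
theorem getElem?_flatten_replicate (numbers : List Int) (m i : Nat)
    (hn : 0 < numbers.length) (h : i < m * numbers.length) :
    ((List.replicate m numbers).flatten)[i]? = numbers[i % numbers.length]? := by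
  induction m generalizing i with
  | zero => omega
  | succ m ih =>
    have hs : (m + 1) * numbers.length = m * numbers.length + numbers.length :=
      Nat.succ_mul m numbers.length
    rw [List.replicate_succ, List.flatten_cons]
    by_cases hi : i < numbers.length
    · rw [List.getElem?_append_left hi, Nat.mod_eq_of_lt hi]
    · rw [List.getElem?_append_right (by omega), ih (i - numbers.length) (by omega)]
      congr 1
      exact (Nat.mod_eq_sub_mod (by omega)).symm

theorem pyRange_two (k : Int) (hk : 0 < k) :
    PySem.List.pyRange 0 (k * 2) 2 = (List.range k.toNat).map (fun t : Nat => ((2 * t : Nat) : Int)) := by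
  rw [PySem.List.pyRange_of_pos _ _ (by omega : (0:Int) < 2)]
  rw [if_pos (by omega)]
  have : ((k * 2 - 0 + 2 - 1) / 2) = k := by omega
  rw [this]
  apply List.map_congr_left
  intro t _; push_cast; ring

-- ===== VERDICT (by name: the statement is the Claim_ definition above) =====
theorem solution_spec : Claim_equal_solution := by
  intro numbers k _ hpre
  unfold Spec_solution solution solution_alt
  by_cases hk : k ≤ 0
  · rw [if_pos hk]
    rw [PySem.List.pyRange_of_pos _ _ (by omega : (0:Int) < 2), if_neg (by omega)]
    simp
  · rw [if_neg hk]
    rcases hpre with h | ⟨hn, hb⟩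
    · omega
    have hk1 : 1 ≤ k := by omega
    rw [pyRange_two k (by omega)]
    set m : Nat := k.toNat with hm
    have hkm : (m : Int) = k := Int.toNat_of_nonneg (by omega)
    have hm1 : 1 ≤ m := by omega
    -- peel the last iteration of the scan loop
    have hsplit : List.range m = List.range (m - 1) ++ [m - 1] := by
      conv_lhs => rw [show m = (m - 1) + 1 by omega]
      rw [List.range_succ]
    rw [hsplit, List.map_append, List.foldl_append]
    simp only [List.map_cons, List.map_nil, List.foldl_cons, List.foldl_nil]
    rw [show pyGetArr? = fun (a : Array Int) (i : Int) =>
          if 0 ≤ i then a[i.toNat]? else PySem.List.pyGet? a.toList i from rfl]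
    simp only [Int.natCast_nonneg, if_pos, Int.toNat_natCast, ← Array.getElem?_toList]
    -- it is in range of the concatenation
    have hlen : ((List.replicate m numbers).flatten).length = m * numbers.length := by
      simp [List.length_flatten]
    have hbnd : 2 * (m - 1) < m * numbers.length := by
      have h2 : ((m * numbers.length : Nat) : Int) = k * numbers.length := by
        push_cast; rw [hkm]
      omega
    rw [foldl_extend, Array.toList_empty, List.nil_append,
        show (PySem.List.pyRange 0 k).length = m by
          rw [PySem.List.length_pyRange_one]; omega,
        getElem?_flatten_replicate numbers m _ hn hbnd]
    -- B's index equals the same natural number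
    have hmod : PySem.Int.mod (2 * (k - 1)) (numbers.length : Int)
        = ((2 * (m - 1) % numbers.length : Nat) : Int) := by
      rw [PySem.Int.mod_eq_emod_of_pos (by exact_mod_cast hn)]
      have h2 : (2 : Int) * (k - 1) = ((2 * (m - 1) : Nat) : Int) := by push_cast; omega
      rw [h2]
      exact_mod_cast (Int.natCast_mod (2 * (m - 1)) numbers.length).symm
    rw [hmod, PySem.List.pyGet?_natCast]
    have hlt : 2 * (m - 1) % numbers.length < numbers.length := Nat.mod_lt _ hn
    rw [List.getElem?_eq_getElem hlt]
    simp
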